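-- pv_equiv track=rewrite | github.com/ghrono/curses | hw les 6.py | user_request_many_word
-- ===== SOURCE A (Python) =====
-- def user_request_many_word(user_request, words_in_books):
-- 	book_4_sort = []
-- 	response = []
-- 	for user_request_word in user_request:
-- 		if user_request_word in words_in_books:
-- 			book_4_sort.append(words_in_books.get(user_request_word))
-- 		else:
-- 			response = ['таких книг нету']
-- 			return response
-- 	for books in book_4_sort:
-- 		book_4_sort[0] = set (books) & set (book_4_sort[0])
-- 		if not book_4_sort[0]:
-- 			response = ['таких книг нету']
-- 			return response
-- 	response = book_4_sort[0]
-- 	return response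
-- ===== SOURCE B (Python) =====
-- def user_request_many_word(user_request, words_in_books):
-- 	book_lists = []
-- 	for word in user_request:
-- 		if word not in words_in_books:
-- 			return ['таких книг нету']
-- 		book_lists.append(words_in_books[word])
-- 	candidates = set(book_lists[0])
-- 	count = {}
-- 	for books in book_lists:
-- 		for book in set(books):
-- 			count[book] = count.get(book, 0) + 1
-- 	result = {book for book in candidates if count.get(book, 0) == len(book_lists)}
-- 	return result if result else ['таких книг нету']
-- ===== Notes on version B (the rewrite author's own statement) =====
-- stated objective: alternative
-- what changed: B replaces A's loop of repeated pairwise set intersections (rebuilding sets each step) with one frequency dict built over each list's set, then a single filter of the first list's set keeping books whose count equals the number of lists.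
import Mathlib
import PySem

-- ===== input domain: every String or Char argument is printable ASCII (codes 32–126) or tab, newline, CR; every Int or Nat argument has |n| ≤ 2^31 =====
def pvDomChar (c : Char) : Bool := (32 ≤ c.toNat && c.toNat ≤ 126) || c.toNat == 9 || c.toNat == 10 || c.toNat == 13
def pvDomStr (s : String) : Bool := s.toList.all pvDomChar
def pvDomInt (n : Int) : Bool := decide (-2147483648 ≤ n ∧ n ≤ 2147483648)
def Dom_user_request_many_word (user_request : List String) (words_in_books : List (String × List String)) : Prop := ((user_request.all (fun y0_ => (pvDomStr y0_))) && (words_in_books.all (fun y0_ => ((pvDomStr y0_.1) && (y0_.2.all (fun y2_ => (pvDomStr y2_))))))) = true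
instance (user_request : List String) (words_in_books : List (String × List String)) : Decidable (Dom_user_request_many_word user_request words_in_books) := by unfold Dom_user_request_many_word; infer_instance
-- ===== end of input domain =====

-- B replaces A's chain of pairwise set intersections by one frequency dict over each list's set
-- plus a single filter of the first list's set (objective: alternative; return value only).

-- ===== PORT A =====
-- dict lookup, first match ('word in words_in_books' / 'words_in_books.get(word)')
def urmwGet? (words_in_books : List (String × List String)) (w : String) : Option (List String) :=
  (words_in_books.find? (fun p => p.1 == w)).map (fun p => p.2)

-- the first loop, identical in both Pythons: collect the book lists; none = some word missing
def urmwCollect (words_in_books : List (String × List String)) : List String → Option (List (List String))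
  | [] => some []
  | w :: ws =>
    match urmwGet? words_in_books w with
    | some bs => (urmwCollect words_in_books ws).map (fun r => bs :: r)
    | none => none

def urmwMsg : List String := ["таких книг нету"]

-- A's second loop: book_4_sort[0] is the mutated cell (the accumulator); iteration reads the
-- original elements in order.  Python's set iteration order is hash-arbitrary (outputs are
-- compared as sets); the port keeps the accumulator's insertion order for 'set(books) & set(cell)'.
def urmwInterLoop : List (List String) → List String → Option (List String)
  | [], acc => some acc
  | books :: rest, acc =>
    let acc' := PySem.Set.inter (PySem.Set.ofList acc) (PySem.Set.ofList books)
    if acc' = [] then none else urmwInterLoop rest acc'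

def user_request_many_word (user_request : List String) (words_in_books : List (String × List String)) : List String :=
  match urmwCollect words_in_books user_request with
  | none => urmwMsg
  | some book_4_sort =>
    -- 'response = book_4_sort[0]' and the reads of cell 0: under Pre_ the list is nonempty
    match urmwInterLoop book_4_sort (PySem.List.pyGetD book_4_sort 0 []) with
    | none => urmwMsg
    | some acc => acc

-- ===== PORT B =====
-- the count dict: for books in book_lists: for book in set(books): count[book] = count.get(book,0)+1
def urmwCount (book_lists : List (List String)) : PySem.Dict String Int :=
  book_lists.foldl
    (fun d books => (PySem.Set.ofList books).foldl (fun d b => d.insert b (d.getD b 0 + 1)) d)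
    PySem.Dict.empty

def user_request_many_word_alt (user_request : List String) (words_in_books : List (String × List String)) : List String :=
  match urmwCollect words_in_books user_request with
  | none => urmwMsg
  | some book_lists =>
    let candidates := PySem.Set.ofList (PySem.List.pyGetD book_lists 0 [])
    let count := urmwCount book_lists
    let result := candidates.filter (fun b => count.getD b 0 == PySem.List.len book_lists)
    if result = [] then urmwMsg else result

-- ===== PRECONDITION & SPEC =====
-- Pre_ excludes only the empty request, on which both Pythons raise IndexError (book_4_sort[0]).
def Pre_user_request_many_word (user_request : List String) (words_in_books : List (String × List String)) : Prop := user_request ≠ []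
instance (user_request : List String) (words_in_books : List (String × List String)) : Decidable (Pre_user_request_many_word user_request words_in_books) := by unfold Pre_user_request_many_word; infer_instance

def pvWitness_user_request_many_word : List String × (List (String × List String)) :=
  (["a"], [("a", ["x", "y"])])

def Spec_user_request_many_word (user_request : List String) (words_in_books : List (String × List String)) (out : List String) : Prop := out = user_request_many_word_alt user_request words_in_books
instance (user_request : List String) (words_in_books : List (String × List String)) (out : List String) : Decidable (Spec_user_request_many_word user_request words_in_books out) := by unfold Spec_user_request_many_word; infer_instance

-- ===== CLAIM (what is proved, stated in full; the proofs are below) =====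
def Claim_equal_user_request_many_word : Prop := ∀ (user_request : List String) (words_in_books : List (String × List String)), Dom_user_request_many_word user_request words_in_books → Pre_user_request_many_word user_request words_in_books → Spec_user_request_many_word user_request words_in_books (user_request_many_word user_request words_in_books)

-- ===== LEMMAS AND PROOFS =====

theorem urmwCollect_length (wib : List (String × List String)) :
    ∀ ur L, urmwCollect wib ur = some L → L.length = ur.length := by
  intro ur
  induction ur with
  | nil => intro L h; simp [urmwCollect] at h; simp [← h]
  | cons w ws ih =>
    intro L h
    simp only [urmwCollect] at h
    cases hg : urmwGet? wib w with
    | none => simp [hg] at h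
    | some bs =>
      rw [hg] at h
      cases hc : urmwCollect wib ws with
      | none => simp [hc] at h
      | some R => rw [hc] at h; simp at h; subst h; simp [ih R hc]

theorem urmw_contains_ofList (books : List String) (b : String) :
    (PySem.Set.ofList books).contains b = books.contains b := by
  by_cases hb : b ∈ books <;> simp

-- A's intersection loop, characterised: a single filter by membership in every remaining list.
theorem urmwInterLoop_eq :
    ∀ (rest : List (List String)) (acc : List String), acc.Nodup → acc ≠ [] →
    urmwInterLoop rest acc =
      (if acc.filter (fun b => rest.all (fun l => l.contains b)) = [] then none
       else some (acc.filter (fun b => rest.all (fun l => l.contains b)))) := by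
  intro rest
  induction rest with
  | nil =>
    intro acc _ hne
    simp [urmwInterLoop, List.filter_eq_self.mpr (fun _ _ => rfl), hne]
  | cons books rest ih =>
    intro acc hnd hne
    have hself : PySem.Set.ofList acc = acc := PySem.Set.ofList_eq_self_of_nodup acc hnd
    have hstep : PySem.Set.inter (PySem.Set.ofList acc) (PySem.Set.ofList books)
        = acc.filter (fun b => books.contains b) := by
      simp only [PySem.Set.inter, hself]
      exact List.filter_congr (fun b _ => urmw_contains_ofList books b)
    have hff : (acc.filter (fun b => books.contains b)).filter
          (fun b => rest.all (fun l => l.contains b))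
        = acc.filter (fun b => (books :: rest).all (fun l => l.contains b)) := by
      rw [List.filter_filter]
      exact List.filter_congr (fun b _ => by simp [List.all_cons, Bool.and_comm])
    simp only [urmwInterLoop, hstep]
    by_cases hempty : acc.filter (fun b => books.contains b) = []
    · have h2 : acc.filter (fun b => (books :: rest).all (fun l => l.contains b)) = [] := by
        rw [← hff, hempty]; rfl
      rw [if_pos hempty, if_pos h2]
    · rw [if_neg hempty, ih _ (hnd.filter _) hempty, hff]

-- B's count dict, characterised: count.get(b, 0) counts the lists containing b.
theorem urmwCount_getD :
    ∀ (L : List (List String)) (d : PySem.Dict String Int) (b : String),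
    (L.foldl (fun d books => (PySem.Set.ofList books).foldl
        (fun d b => d.insert b (d.getD b 0 + 1)) d) d).getD b 0
      = d.getD b 0 + (L.countP (fun l => l.contains b) : Int) := by
  intro L
  induction L with
  | nil => intro d b; simp
  | cons books L ih =>
    intro d b
    have hinner : ((PySem.Set.ofList books).foldl
        (fun d b => d.insert b (d.getD b 0 + 1)) d).getD b 0
        = d.getD b 0 + ((PySem.Set.ofList books).count b : Int) :=
      PySem.Dict.getD_foldl_insert_add_one (PySem.Set.ofList books) d b
    have hcount : (PySem.Set.ofList books).count b = if b ∈ books then 1 else 0 := by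
      by_cases hb : b ∈ books
      · have h1 : (PySem.Set.ofList books).count b ≤ 1 :=
          List.nodup_iff_count_le_one.mp (PySem.Set.nodup_ofList books) b
        have h2 : 0 < (PySem.Set.ofList books).count b :=
          List.count_pos_iff.mpr ((PySem.Set.mem_ofList books b).mpr hb)
        simp only [if_pos hb]; omega
      · rw [if_neg hb]
        exact List.count_eq_zero.mpr (fun h => hb ((PySem.Set.mem_ofList books b).mp h))
    rw [List.foldl_cons, ih, hinner, hcount, List.countP_cons]
    by_cases hb : b ∈ books <;> simp [hb] <;> omega

theorem user_request_many_word_spec : Claim_equal_user_request_many_word := by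
  intro ur wib _hdom hpre
  unfold Spec_user_request_many_word
  unfold user_request_many_word user_request_many_word_alt
  cases hc : urmwCollect wib ur with
  | none => rfl
  | some L =>
    have hLne : L ≠ [] := by
      intro h
      have := urmwCollect_length wib ur L hc
      rw [h] at this
      exact hpre (List.eq_nil_of_length_eq_zero this.symm)
    obtain ⟨l0, rest, rfl⟩ := List.exists_cons_of_ne_nil hLne
    have hget : PySem.List.pyGetD (l0 :: rest) (0 : Int) ([] : List String) = l0 :=
      PySem.List.pyGetD_zero_cons l0 rest []
    -- A's first intersection step turns the cell into set(l0)
    have hself : PySem.Set.inter (PySem.Set.ofList l0) (PySem.Set.ofList l0)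
        = PySem.Set.ofList l0 := by
      simp only [PySem.Set.inter]
      exact List.filter_eq_self.mpr (fun b hb => by
        rw [urmw_contains_ofList]
        exact List.contains_iff_mem.mpr ((PySem.Set.mem_ofList l0 b).mp hb))
    -- the common result: set(l0) filtered by membership in every list
    have hpred : ∀ b ∈ PySem.Set.ofList l0,
        ((urmwCount (l0 :: rest)).getD b 0 == PySem.List.len (l0 :: rest))
          = (rest.all (fun l => l.contains b)) := by
      intro b hb
      have hb0 : l0.contains b = true :=
        List.contains_iff_mem.mpr ((PySem.Set.mem_ofList l0 b).mp hb)
      have hcnt : (urmwCount (l0 :: rest)).getD b 0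
          = ((l0 :: rest).countP (fun l => l.contains b) : Int) := by
        have := urmwCount_getD (l0 :: rest) PySem.Dict.empty b
        simpa [urmwCount] using this
      have hlen : PySem.List.len (l0 :: rest) = ((l0 :: rest).length : Int) := by
        simp [PySem.List.len_eq]
      by_cases hall : rest.all (fun l => l.contains b) = true
      · have heq : (l0 :: rest).countP (fun l => l.contains b) = (l0 :: rest).length :=
          List.countP_eq_length.mpr (by
            intro l hl
            rcases List.mem_cons.mp hl with h | h
            · rw [h]; exact hb0
            · exact List.all_eq_true.mp hall l h)
        rw [hall, hcnt, hlen, heq, beq_iff_eq]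
      · have hlt : (l0 :: rest).countP (fun l => l.contains b) ≠ (l0 :: rest).length := by
          intro h
          exact hall (List.all_eq_true.mpr (fun l hl =>
            List.countP_eq_length.mp h l (List.mem_cons_of_mem _ hl)))
        have hallf : rest.all (fun l => l.contains b) = false := by
          simpa using hall
        rw [hallf, hcnt, hlen, beq_eq_false_iff_ne]
        exact fun h => hlt (by exact_mod_cast h)
    have hfilter : (PySem.Set.ofList l0).filter
          (fun b => (urmwCount (l0 :: rest)).getD b 0 == PySem.List.len (l0 :: rest))
        = (PySem.Set.ofList l0).filter (fun b => rest.all (fun l => l.contains b)) :=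
      List.filter_congr hpred
    simp only [hget]
    rw [show urmwInterLoop (l0 :: rest) l0
        = (if PySem.Set.ofList l0 = [] then none
           else urmwInterLoop rest (PySem.Set.ofList l0)) by
      simp only [urmwInterLoop, hself]]
    by_cases h0 : PySem.Set.ofList l0 = []
    · -- l0 is empty: both sides return the message
      have h2 : (PySem.Set.ofList l0).filter
          (fun b => (urmwCount (l0 :: rest)).getD b 0 == PySem.List.len (l0 :: rest)) = [] := by
        rw [h0]; rfl
      rw [if_pos h0, if_pos h2]
    · rw [if_neg h0,
        urmwInterLoop_eq rest (PySem.Set.ofList l0) (PySem.Set.nodup_ofList l0) h0,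
        ← hfilter]
      by_cases hres : (PySem.Set.ofList l0).filter
          (fun b => (urmwCount (l0 :: rest)).getD b 0 == PySem.List.len (l0 :: rest)) = []
      · rw [if_pos hres, if_pos hres]
      · rw [if_neg hres, if_neg hres]
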